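-- pv_equiv track=rewrite | github.com/RobbeW/Data_Statistiek_R | Deel 3 Algoritmiek/03 Hogere dimensie/06 Foutdetectie/solution/solution.nl.py | detecteer
-- ===== SOURCE A (Python) =====
-- def detecteer(matrix):
--     n = len(matrix[0])
--     r = 0
--     c = 0
--     for i in range(n):
--         som = 0
--         for j in range(n):
--             som += matrix[i][j]
--         if som % 2 != 0:
--             r = i
--
--         som = 0
--         for j in range(n):
--             som += matrix[j][i]
--         if som % 2 != 0:
--             c = i
--
--     return (r,c)
-- ===== SOURCE B (Python) =====
-- def detecteer(matrix):
--     n = len(matrix[0])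
--     col = [0] * n
--     r = 0
--     for i in range(n):
--         row = matrix[i]
--         if sum(row[:n]) % 2 != 0:
--             r = i
--         col = [cs + x for cs, x in zip(col, row)]
--     c = 0
--     for j in range(n):
--         if col[j] % 2 != 0:
--             c = j
--     return (r, c)
-- ===== Notes on version B (the rewrite author's own statement) =====
-- stated objective: faster
-- what changed: B makes a single pass over the rows, maintaining a running column-sum vector (zip/add) so columns are never re-scanned transposed; a final scan over the column sums picks the last odd column.
import Mathlib
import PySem

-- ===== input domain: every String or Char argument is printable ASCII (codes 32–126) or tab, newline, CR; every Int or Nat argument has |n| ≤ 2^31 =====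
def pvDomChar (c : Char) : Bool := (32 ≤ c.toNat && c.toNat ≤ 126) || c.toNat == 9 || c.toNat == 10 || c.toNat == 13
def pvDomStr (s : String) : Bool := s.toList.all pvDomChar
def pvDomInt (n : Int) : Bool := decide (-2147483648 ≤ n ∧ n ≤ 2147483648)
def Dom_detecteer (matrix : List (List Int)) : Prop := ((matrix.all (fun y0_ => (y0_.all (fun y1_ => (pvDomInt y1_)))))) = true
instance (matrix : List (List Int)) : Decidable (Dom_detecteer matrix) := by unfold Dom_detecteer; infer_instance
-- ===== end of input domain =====

-- B replaces A's transposed column re-scan by a single pass over the rows that maintains a running column-sum vector.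

-- ===== PORT A =====
def detecteer (matrix : List (List Int)) : Int × Int :=
  let n : Int := ((PySem.List.pyGetD matrix 0 []).length : Int)
  (PySem.List.pyRange 0 n 1).foldl (fun rc i =>
    let som1 := (PySem.List.pyRange 0 n 1).foldl
      (fun s j => s + PySem.List.pyGetD (PySem.List.pyGetD matrix i []) j 0) 0
    let rc1 := if PySem.Int.mod som1 2 ≠ 0 then (i, rc.2) else rc
    let som2 := (PySem.List.pyRange 0 n 1).foldl
      (fun s j => s + PySem.List.pyGetD (PySem.List.pyGetD matrix j []) i 0) 0
    if PySem.Int.mod som2 2 ≠ 0 then (rc1.1, i) else rc1) ((0 : Int), (0 : Int))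

-- ===== PORT B =====
def detecteer_alt (matrix : List (List Int)) : Int × Int :=
  let n : Int := ((PySem.List.pyGetD matrix 0 []).length : Int)
  let rcol := (PySem.List.pyRange 0 n 1).foldl (fun (st : Int × List Int) i =>
      let row := PySem.List.pyGetD matrix i []
      ((if PySem.Int.mod (PySem.List.slice row none (some n)).sum 2 ≠ 0 then i else st.1),
       (st.2.zip row).map (fun p => p.1 + p.2))) ((0 : Int), List.replicate n.toNat 0)
  let c := (PySem.List.pyRange 0 n 1).foldl (fun c j =>
      if PySem.Int.mod (PySem.List.pyGetD rcol.2 j 0) 2 ≠ 0 then j else c) 0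
  (rcol.1, c)

-- ===== PRECONDITION & SPEC =====
-- A raises IndexError on the empty matrix and when some of the first n rows/columns are missing
-- (fewer than n = len(matrix[0]) rows, or one of the first n rows shorter than n); Pre_ excludes exactly those.
def Pre_detecteer (matrix : List (List Int)) : Prop :=
  matrix ≠ [] ∧ (matrix.headD []).length ≤ matrix.length ∧
    ∀ row ∈ matrix.take (matrix.headD []).length, (matrix.headD []).length ≤ row.length
instance (matrix : List (List Int)) : Decidable (Pre_detecteer matrix) := by
  unfold Pre_detecteer; infer_instance
def pvWitness_detecteer : List (List Int) := [[1, 0], [0, 0]]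
def Spec_detecteer (matrix : List (List Int)) (out : Int × Int) : Prop := out = detecteer_alt matrix
instance (matrix : List (List Int)) (out : Int × Int) : Decidable (Spec_detecteer matrix out) := by
  unfold Spec_detecteer; infer_instance

-- ===== CLAIM (what is proved, stated in full; the proofs are below) =====
def Claim_equal_detecteer : Prop := ∀ (matrix : List (List Int)), Dom_detecteer matrix → Pre_detecteer matrix → Spec_detecteer matrix (detecteer matrix)

-- ===== LEMMAS AND PROOFS =====
def pvColsum (M : List (List Int)) (k t : Nat) : Int :=
  ((M.take k).map (fun row => row.getD t 0)).sum

theorem pv_sumRange (xs : List Int) (N : Nat) (h : N ≤ xs.length) :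
    (PySem.List.pyRange 0 (N : Int) 1).foldl (fun s j => s + PySem.List.pyGetD xs j 0) 0
      = (xs.take N).sum := by
  induction N with
  | zero => simp
  | succ k ih =>
    have hlt : k < xs.length := h
    have hc : ((k+1 : Nat) : Int) = (k : Int) + 1 := by push_cast; ring
    rw [hc, PySem.List.pyRange_one_succ_right (by positivity), List.foldl_append,
      ih (Nat.le_of_succ_le h), List.sum_take_succ xs k hlt]
    simp [List.getD_eq_getElem?_getD, List.getElem?_eq_getElem hlt]

theorem pv_colRange (M : List (List Int)) (N : Nat) (hN : N ≤ M.length) (i : Int) (hi : 0 ≤ i) :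
    (PySem.List.pyRange 0 (N : Int) 1).foldl
        (fun s j => s + PySem.List.pyGetD (PySem.List.pyGetD M j []) i 0) 0
      = pvColsum M N i.toNat := by
  induction N with
  | zero => simp [pvColsum]
  | succ k ih =>
    have hlt : k < M.length := hN
    have hlt' : k < (M.map (fun row => row.getD i.toNat 0)).length := by simpa using hlt
    have hc : ((k+1 : Nat) : Int) = (k : Int) + 1 := by push_cast; ring
    have : pvColsum M (k+1) i.toNat = pvColsum M k i.toNat + M[k].getD i.toNat 0 := by
      simp only [pvColsum, List.map_take]
      rw [List.sum_take_succ _ k hlt']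
      simp
    rw [hc, PySem.List.pyRange_one_succ_right (by positivity), List.foldl_append,
      ih (Nat.le_of_succ_le hN), this]
    simp [PySem.List.pyGetD_of_nonneg _ _ hi, List.getD_eq_getElem?_getD,
      List.getElem?_eq_getElem hlt]

theorem pv_zipstep (S : Nat → Int) (row : List Int) (N : Nat) (h : N ≤ row.length) :
    (((List.range N).map S).zip row).map (fun p => p.1 + p.2)
      = (List.range N).map (fun t => S t + row.getD t 0) := by
  apply List.ext_getElem
  · simp [Nat.min_eq_left h]
  · intro t h1 h2
    have ht : t < N := by simpa using h2
    have htr : t < row.length := lt_of_lt_of_le ht h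
    simp [List.getElem_zip, List.getD_eq_getElem?_getD, List.getElem?_eq_getElem htr]

theorem pv_colsum_succ (M : List (List Int)) (k t : Nat) (hk : k < M.length) :
    pvColsum M (k+1) t = pvColsum M k t + (M.getD k []).getD t 0 := by
  have hlt' : k < (M.map (fun row => row.getD t 0)).length := by simpa using hk
  simp only [pvColsum, List.map_take]
  rw [List.sum_take_succ _ k hlt']
  simp [List.getD_eq_getElem?_getD, List.getElem?_eq_getElem hk]

theorem pv_colInv (M : List (List Int)) (N : Nat) (hN : N ≤ M.length)
    (hrow : ∀ k < N, N ≤ (M.getD k []).length) :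
    ∀ k, k ≤ N →
    (PySem.List.pyRange 0 (k : Int) 1).foldl
        (fun (col : List Int) i => (col.zip (PySem.List.pyGetD M i [])).map (fun p => p.1 + p.2))
        (List.replicate N 0)
      = (List.range N).map (fun t => pvColsum M k t) := by
  intro k
  induction k with
  | zero => intro _; simp [pvColsum, List.map_const']
  | succ k ih =>
    intro hkN
    have hk : k < M.length := lt_of_lt_of_le hkN hN
    have hc : ((k+1 : Nat) : Int) = (k : Int) + 1 := by push_cast; ring
    rw [hc, PySem.List.pyRange_one_succ_right (by positivity), List.foldl_append,
      ih (Nat.le_of_succ_le hkN)]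
    have hrowlen : N ≤ (M.getD k []).length := hrow k hkN
    simp only [List.foldl_cons, List.foldl_nil, PySem.List.pyGetD_natCast]
    rw [pv_zipstep _ _ _ hrowlen]
    exact List.map_congr_left (fun t _ => (pv_colsum_succ M k t hk).symm)

theorem pv_foldA (P Q : Int → Prop) [DecidablePred P] [DecidablePred Q]
    (l : List Int) (a b : Int) :
    l.foldl (fun rc i =>
        if Q i then ((if P i then (i, rc.2) else rc).1, i)
        else if P i then (i, rc.2) else rc) (a, b)
      = (l.foldl (fun r i => if P i then i else r) a,
         l.foldl (fun c i => if Q i then i else c) b) := by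
  induction l generalizing a b with
  | nil => rfl
  | cons x l ih =>
    simp only [List.foldl_cons]
    split_ifs <;> simp [ih]

theorem pv_main (matrix : List (List Int)) (hne : matrix ≠ [])
    (hlen : (matrix.headD []).length ≤ matrix.length)
    (hrows : ∀ row ∈ matrix.take (matrix.headD []).length, (matrix.headD []).length ≤ row.length) :
    detecteer matrix = detecteer_alt matrix := by
  set N := (matrix.headD []).length with hNdef
  have h0 : PySem.List.pyGetD matrix 0 [] = matrix.headD [] := by
    cases matrix with
    | nil => simp at hne
    | cons a l => simp [PySem.List.pyGetD_zero]
  -- per-row length fact at nat index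
  have hrow' : ∀ k < N, N ≤ (matrix.getD k []).length := by
    intro k hk
    have hkm : k < matrix.length := lt_of_lt_of_le hk hlen
    have : matrix.getD k [] = matrix[k] := by
      simp [List.getD_eq_getElem?_getD, List.getElem?_eq_getElem hkm]
    rw [this]
    exact hrows _ (List.mem_take_iff_getElem.mpr ⟨k, by omega, by simp⟩)
  simp only [detecteer, detecteer_alt, h0, ← hNdef]
  rw [pv_foldA, PySem.List.foldl_prod_mk
    (fun r i => if PySem.Int.mod (PySem.List.slice (PySem.List.pyGetD matrix i []) none (some ((N:Nat):Int))).sum 2 ≠ 0 then i else r)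
    (fun (col : List Int) i => List.map (fun p : Int × Int => p.1 + p.2) (col.zip (PySem.List.pyGetD matrix i [])))]
  have hcol : List.foldl
      (fun (col : List Int) i => List.map (fun p : Int × Int => p.1 + p.2) (col.zip (PySem.List.pyGetD matrix i [])))
      (List.replicate ((N : Int)).toNat 0) (PySem.List.pyRange 0 (N : Int) 1)
      = (List.range N).map (fun t => pvColsum matrix N t) := by
    have h := pv_colInv matrix N hlen hrow' N le_rfl
    simpa using h
  refine Prod.ext ?_ ?_
  · dsimp only
    apply PySem.List.foldl_congr_mem
    intro acc i hi
    obtain ⟨hi0, hiN⟩ := (PySem.List.mem_pyRange_one).mp hi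
    have hiN' : i.toNat < N := by omega
    have hrowlen : N ≤ (matrix.getD i.toNat []).length := hrow' _ hiN'
    have hrowEq : PySem.List.pyGetD matrix i [] = matrix.getD i.toNat [] :=
      PySem.List.pyGetD_of_nonneg _ _ hi0
    rw [hrowEq, pv_sumRange (matrix.getD i.toNat []) N hrowlen,
      PySem.List.slice_to_natCast]
  · dsimp only
    rw [hcol]
    apply PySem.List.foldl_congr_mem
    intro acc j hj
    obtain ⟨hj0, hjN⟩ := (PySem.List.mem_pyRange_one).mp hj
    have hjN' : j.toNat < N := by omega
    rw [pv_colRange matrix N hlen j hj0]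
    have hmap : PySem.List.pyGetD ((List.range N).map (fun t => pvColsum matrix N t)) j 0
        = pvColsum matrix N j.toNat := by
      rw [PySem.List.pyGetD_eq_getElem _ _ hj0 (by simpa using (by omega : j < (N : Int)))]
      simp
    rw [hmap]

-- ===== VERDICT (by name: the statement is the Claim_ definition above) =====
theorem detecteer_spec : Claim_equal_detecteer := by
  intro matrix _ hpre
  obtain ⟨hne, hlen, hrows⟩ := hpre
  exact pv_main matrix hne hlen hrows
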